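-- pv_equiv track=rewrite | github.com/lutacluny/Sheet-Music-Recognition | object_detection/identify_lines.py | calc_pixel_between_black_structures
-- ===== SOURCE A (Python) =====
-- def calc_pixel_between_black_structures(col):
--     pixel_between_black_structures = []
--
--     is_prev_white = True
--     pixel_in_between = 0
--
--     for pixel in col:
--
--         if isBlack(pixel):
--
--             if is_prev_white:
--                 pixel_between_black_structures.append(pixel_in_between)
--                 pixel_in_between = 0
--             is_prev_white = False
--
--         else:
--             pixel_in_between += 1
--             is_prev_white = True
--
--     if is_prev_white:
--         pixel_between_black_structures.append(pixel_in_between)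
--
--     return pixel_between_black_structures
--
-- def isBlack(pixel):
--     if pixel == True:
--         return False
--     else:
--         return True
-- ===== SOURCE B (Python) =====
-- def isBlack(pixel):
--     if pixel == True:
--         return False
--     else:
--         return True
--
--
-- def run_lengths(col):
--     """Return the list of (key, run_length) for maximal runs of equal isBlack-key."""
--     runs = []
--     i = 0
--     while i < len(col):
--         k = isBlack(col[i])
--         j = i
--         while j < len(col) and isBlack(col[j]) == k:
--             j += 1
--         runs.append((k, j - i))
--         i = j
--     return runs
--
--
-- def calc_pixel_between_black_structures(col):
--     result = []
--     pending = 0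
--     last_was_black = False
--     for key, length in run_lengths(col):
--         if key:
--             result.append(pending)
--             pending = 0
--             last_was_black = True
--         else:
--             pending = length
--             last_was_black = False
--     if not last_was_black:
--         result.append(pending)
--     return result
-- ===== Notes on version B (the rewrite author's own statement) =====
-- stated objective: alternative
-- what changed: B first compresses the column into maximal (key, run-length) groups and then folds over runs with a pending-white count and a last-was-black flag, instead of A's per-pixel loop with an is_prev_white state machine.
import Mathlib
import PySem

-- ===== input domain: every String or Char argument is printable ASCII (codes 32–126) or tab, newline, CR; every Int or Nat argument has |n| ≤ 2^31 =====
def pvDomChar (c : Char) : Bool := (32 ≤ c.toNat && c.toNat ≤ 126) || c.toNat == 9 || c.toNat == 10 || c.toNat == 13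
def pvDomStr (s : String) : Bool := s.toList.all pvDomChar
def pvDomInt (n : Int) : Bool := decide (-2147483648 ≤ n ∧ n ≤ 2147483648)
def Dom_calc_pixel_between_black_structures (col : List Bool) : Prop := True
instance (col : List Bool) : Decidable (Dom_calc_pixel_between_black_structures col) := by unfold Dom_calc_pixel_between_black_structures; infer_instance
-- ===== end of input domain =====

-- B replaces A's per-pixel is_prev_white state machine by a run-length compression
-- of the column followed by a fold over the runs (objective: alternative decomposition).

-- ===== PORT A =====
-- helper isBlack, shared by both Pythons
def isBlack (pixel : Bool) : Bool :=
  if pixel == true then false else true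

-- loop body of A's `for pixel in col`, state = (pixel_between_black_structures, is_prev_white, pixel_in_between)
def pvStepA (st : List Int × Bool × Int) (pixel : Bool) : List Int × Bool × Int :=
  if isBlack pixel then
    (if st.2.1 then (st.1 ++ [st.2.2], false, 0) else (st.1, false, st.2.2))
  else (st.1, true, st.2.2 + 1)

def calc_pixel_between_black_structures (col : List Bool) : List Int :=
  let s := col.foldl pvStepA ([], true, 0)
  s.1 ++ (if s.2.1 then [s.2.2] else [])

-- ===== PORT B =====
-- Source B's run_lengths: the outer while advances i to j, the run length j - i is the
-- length of the maximal prefix of equal isBlack-key (inner while); ported as the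
-- structurally equivalent takeWhile/dropWhile recursion (exact step for step).
def pvRuns : List Bool → List (Bool × Nat)
  | [] => []
  | x :: xs =>
    let k := isBlack x
    (k, (xs.takeWhile (fun y => isBlack y == k)).length + 1)
      :: pvRuns (xs.dropWhile (fun y => isBlack y == k))
  termination_by l => l.length
  decreasing_by
    simp only [List.length_cons]
    have := List.length_dropWhile_le (fun y => isBlack y == isBlack x) xs
    omega

-- Source B's `for key, length in run_lengths(col)` loop plus the final append,
-- state = (result, last_was_black, pending)
def pvBFold : List (Bool × Nat) → List Int → Bool → Int → List Int
  | [], result, lastBlack, pending => result ++ (if lastBlack then [] else [pending])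
  | (key, length) :: rs, result, _, pending =>
    if key then pvBFold rs (result ++ [pending]) true 0
    else pvBFold rs result false (Int.ofNat length)

def calc_pixel_between_black_structures_alt (col : List Bool) : List Int :=
  pvBFold (pvRuns col) [] false 0

-- ===== PRECONDITION & SPEC =====
def Spec_calc_pixel_between_black_structures (col : List Bool) (out : List Int) : Prop := out = calc_pixel_between_black_structures_alt col
instance (col : List Bool) (out : List Int) : Decidable (Spec_calc_pixel_between_black_structures col out) := by unfold Spec_calc_pixel_between_black_structures; infer_instance

-- ===== CLAIM (what is proved, stated in full; the proofs are below) =====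
def Claim_equal_calc_pixel_between_black_structures : Prop := ∀ (col : List Bool), Dom_calc_pixel_between_black_structures col → Spec_calc_pixel_between_black_structures col (calc_pixel_between_black_structures col)

-- ===== LEMMAS AND PROOFS =====

-- wrapping up A's final state into A's returned list
def pvFinishA (s : List Int × Bool × Int) : List Int :=
  s.1 ++ (if s.2.1 then [s.2.2] else [])

-- A's loop over an all-black list from a not-prev-white state changes nothing
lemma foldl_black (t : List Bool) (h : ∀ y ∈ t, isBlack y = true)
    (acc : List Int) (p : Int) :
    t.foldl pvStepA (acc, false, p) = (acc, false, p) := by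
  induction t with
  | nil => rfl
  | cons y ys ih =>
    have hy : isBlack y = true := h y (by simp)
    simp only [List.foldl_cons, pvStepA, hy, if_true]
    exact ih (fun z hz => h z (by simp [hz]))

-- A's loop over an all-white list just accumulates the count and sets prev-white
lemma foldl_white (t : List Bool) (h : ∀ y ∈ t, isBlack y = false)
    (acc : List Int) (p : Int) :
    t.foldl pvStepA (acc, true, p) = (acc, true, p + t.length) := by
  induction t generalizing p with
  | nil => simp
  | cons y ys ih =>
    have hy : isBlack y = false := h y (by simp)
    simp only [List.foldl_cons, pvStepA, hy, Bool.false_eq_true, if_false]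
    rw [ih (fun z hz => h z (by simp [hz])) (p + 1)]
    simp only [List.length_cons, Prod.mk.injEq, true_and]
    push_cast
    ring

-- head of dropWhile fails the predicate
lemma head_dropWhile_false {α : Type} (p : α → Bool) (l : List α) (h : α)
    (hh : (l.dropWhile p).head? = some h) : p h = false := by
  induction l with
  | nil => simp at hh
  | cons x xs ih =>
    by_cases hp : p x
    · rw [List.dropWhile_cons_of_pos hp] at hh; exact ih hh
    · rw [List.dropWhile_cons_of_neg hp] at hh
      simp at hh; subst hh; exact Bool.not_eq_true _ ▸ (by simpa using hp)

-- main invariant: A's loop from a state matching B's (flag negated) produces B's fold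
lemma pv_main : ∀ (n : Nat) (col : List Bool), col.length ≤ n →
    ∀ (acc : List Int) (b : Bool) (p : Int),
    (b = true → p = 0 ∧ ∀ h ∈ col.head?, isBlack h = false) →
    (b = false → p = 0 ∨ ∀ h ∈ col.head?, isBlack h = true) →
    pvFinishA (col.foldl pvStepA (acc, !b, p)) = pvBFold (pvRuns col) acc b p := by
  intro n
  induction n with
  | zero =>
    intro col hlen acc b p _ _
    have : col = [] := List.length_eq_zero_iff.mp (Nat.le_zero.mp hlen)
    subst this
    cases b <;> simp [pvFinishA, pvBFold, pvRuns]
  | succ m ih =>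
    intro col hlen acc b p Hb Hp
    match col with
    | [] => cases b <;> simp [pvFinishA, pvBFold, pvRuns]
    | x :: xs =>
      by_cases hk : isBlack x = true
      · -- black run: b must be false
        have hb : b = false := by
          cases b
          · rfl
          · exact absurd hk (by simpa using (Hb rfl).2 x (by simp))
        subst hb
        have hsplit : xs = xs.takeWhile (fun y => isBlack y == isBlack x)
              ++ xs.dropWhile (fun y => isBlack y == isBlack x) :=
          (List.takeWhile_append_dropWhile).symm
        set t := xs.takeWhile (fun y => isBlack y == isBlack x) with ht
        set r := xs.dropWhile (fun y => isBlack y == isBlack x) with hr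
        have hstep : pvStepA (acc, !false, p) x = (acc ++ [p], false, 0) := by
          simp [pvStepA, hk]
        have htb : ∀ y ∈ t, isBlack y = true := by
          intro y hy
          have := List.mem_takeWhile_imp hy
          simpa [hk] using this
        have hlhs : (x :: xs).foldl pvStepA (acc, !false, p)
            = r.foldl pvStepA (acc ++ [p], false, 0) := by
          conv_lhs => rw [show x :: xs = x :: (t ++ r) by rw [← hsplit]]
          rw [List.foldl_cons, hstep, List.foldl_append, foldl_black t htb]
        have hrlen : r.length ≤ m := by
          have h1 := List.length_dropWhile_le (fun y => isBlack y == isBlack x) xs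
          rw [← hr] at h1
          simp only [List.length_cons] at hlen
          omega
        have hrec := ih r hrlen (acc ++ [p]) true 0
          (by
            intro _
            refine ⟨rfl, ?_⟩
            intro h hh
            have := head_dropWhile_false _ xs h (by simpa [hr] using hh)
            simpa [hk] using this)
          (by intro h; cases h)
        have hruns : pvRuns (x :: xs) = (true, t.length + 1) :: pvRuns r := by
          simp only [pvRuns]
          rw [← ht, ← hr, hk]
        rw [hlhs, hruns]
        simp only [pvBFold, if_true]
        simpa using hrec
      · -- white run: pending must be 0
        have hk' : isBlack x = false := by simpa using hk
        have hp0 : p = 0 := by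
          cases b
          · rcases Hp rfl with h | h
            · exact h
            · exact absurd (h x (by simp)) (by simp [hk'])
          · exact (Hb rfl).1
        subst hp0
        have hsplit : xs = xs.takeWhile (fun y => isBlack y == isBlack x)
              ++ xs.dropWhile (fun y => isBlack y == isBlack x) :=
          (List.takeWhile_append_dropWhile).symm
        set t := xs.takeWhile (fun y => isBlack y == isBlack x) with ht
        set r := xs.dropWhile (fun y => isBlack y == isBlack x) with hr
        have hstep : pvStepA (acc, !b, (0 : Int)) x = (acc, true, 1) := by
          simp [pvStepA, hk']
        have htw : ∀ y ∈ t, isBlack y = false := by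
          intro y hy
          have := List.mem_takeWhile_imp hy
          simpa [hk'] using this
        have hlhs : (x :: xs).foldl pvStepA (acc, !b, (0 : Int))
            = r.foldl pvStepA (acc, !false, (1 + (t.length : Int))) := by
          conv_lhs => rw [show x :: xs = x :: (t ++ r) by rw [← hsplit]]
          rw [List.foldl_cons, hstep, List.foldl_append, foldl_white t htw]
          simp only [Bool.not_false]
        have hrlen : r.length ≤ m := by
          have h1 := List.length_dropWhile_le (fun y => isBlack y == isBlack x) xs
          rw [← hr] at h1
          simp only [List.length_cons] at hlen
          omega
        have hrec := ih r hrlen acc false (1 + (t.length : Int))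
          (by intro h; cases h)
          (by
            intro _
            right
            intro h hh
            have := head_dropWhile_false _ xs h (by simpa [hr] using hh)
            simpa [hk'] using this)
        have hruns : pvRuns (x :: xs) = (false, t.length + 1) :: pvRuns r := by
          simp only [pvRuns]
          rw [← ht, ← hr, hk']
        rw [hlhs, hruns]
        simp only [pvBFold, Bool.false_eq_true, if_false]
        rw [hrec]
        congr 1
        simp only [Int.ofNat_eq_natCast]
        push_cast
        omega

-- ===== VERDICT (by name: the statement is the Claim_ definition above) =====
theorem calc_pixel_between_black_structures_spec : Claim_equal_calc_pixel_between_black_structures := by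
  intro col _
  unfold Spec_calc_pixel_between_black_structures
  unfold calc_pixel_between_black_structures calc_pixel_between_black_structures_alt
  have := pv_main col.length col le_rfl [] false 0
    (by intro h; cases h) (by intro _; left; rfl)
  simpa [pvFinishA] using this
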